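-- pv_equiv track=rewrite | github.com/kchaz/MScDissertation_Public | src/func/AbstractCleaner.py | get_unique_words
-- ===== SOURCE A (Python) =====
-- def get_unique_words(group_dict):
--     """
--     helper function
--
--     returns a dictionary with same keys as group_dict but containing only the values
--     that are unique to that key
--
--
--     ----------
--     group_dict : dictionary of lists or arrays
--
--     Returns
--     -------
--     dictionary as described above
--
--
--     Example (this function is actually more general than words)
--     -------
--     >>> test_dict = {}
--     >>> test_dict["a"] = [1,2,3]
--     >>> test_dict["b"] = [1,2,4, 10]
--     >>> test_dict["c"] = [2,3]
--
--     >>> get_unique_words(test_dict)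
--
--     {'a': set(), 'b': {4, 10}, 'c': set()}
--
--     """
--     groups = list(group_dict.keys())
--
--     out_dict = {}
--     for i,main_group in enumerate(groups):
--         out_dict[main_group] = group_dict[main_group]
--         temp_groups = groups.copy()
--         temp_groups.remove(main_group)
--         for other_group in temp_groups:
--             #get whatever is in main group's vocab that is not in the other's vocab
--             #assymetric, so this doesn't add things from other group that aren't in main group
--             out_dict[main_group] = set(out_dict[main_group]).difference(set(group_dict[other_group]))
--
--     return(out_dict)
-- ===== SOURCE B (Python) =====
-- def get_unique_words(group_dict):
--     # One pass to count, per element, in how many distinct groups it occurs;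
--     # then each group keeps exactly its elements with count 1.
--     count = {}
--     for vals in group_dict.values():
--         for x in set(vals):
--             count[x] = count.get(x, 0) + 1
--     return {g: {x for x in vals if count[x] == 1} for g, vals in group_dict.items()}
-- ===== Notes on version B (the rewrite author's own statement) =====
-- stated objective: faster
-- what changed: Instead of, for every group, subtracting every other group's set (K^2 pairwise set differences), B counts in one pass how many distinct groups each element occurs in and keeps per group the elements with count 1.
-- outside the precondition, e.g. on get_unique_words({'a': [1, 1]}): A returns {'a': [1, 1]}, B returns {'a': {1}}
import Mathlib
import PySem

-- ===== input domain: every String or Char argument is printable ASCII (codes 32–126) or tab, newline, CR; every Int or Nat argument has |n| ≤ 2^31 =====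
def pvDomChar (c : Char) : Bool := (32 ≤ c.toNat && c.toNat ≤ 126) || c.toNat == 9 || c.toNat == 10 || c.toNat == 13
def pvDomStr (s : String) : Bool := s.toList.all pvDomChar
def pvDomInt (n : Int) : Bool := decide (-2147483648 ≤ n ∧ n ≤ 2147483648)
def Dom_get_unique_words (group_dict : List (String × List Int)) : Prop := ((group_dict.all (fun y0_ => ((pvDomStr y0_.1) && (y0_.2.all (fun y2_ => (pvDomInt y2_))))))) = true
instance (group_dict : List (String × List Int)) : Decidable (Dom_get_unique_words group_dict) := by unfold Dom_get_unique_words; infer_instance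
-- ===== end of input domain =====

-- B replaces A's K^2 pairwise set differences by a single distinct-group occurrence count
-- per element (count==1 elements are kept per group): an asymptotically faster algorithm.


-- ===== PORT A =====
def get_unique_words (group_dict : List (String × List Int)) : List (String × List Int) :=
  let d := PySem.Dict.mk group_dict
  let groups := d.keys
  let out : PySem.Dict String (List Int) :=
    groups.foldl (fun out main_group =>
      let out := out.insert main_group (d.getD main_group [])
      let temp_groups := (PySem.List.remove? groups main_group).getD []
      temp_groups.foldl (fun out other_group =>
        out.insert main_group
          (PySem.Set.diff (PySem.Set.ofList (out.getD main_group []))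
                          (PySem.Set.ofList (d.getD other_group [])))) out)
      PySem.Dict.empty
  out.items

-- ===== PORT B =====
def get_unique_words_alt (group_dict : List (String × List Int)) : List (String × List Int) :=
  let count : PySem.Dict Int Int :=
    group_dict.foldl (fun c p =>
      (PySem.Set.ofList p.2).foldl (fun c x => c.insert x (c.getD x 0 + 1)) c)
      PySem.Dict.empty
  group_dict.map (fun p =>
    (p.1, (PySem.Set.ofList p.2).filter (fun x => count.getD x 0 == 1)))

-- ===== PRECONDITION & SPEC =====
-- Pre_ excludes (a) association lists with duplicate keys, which do not arise from a Python
-- dict argument, and (b) single-key dicts whose value list has duplicates, on which A returns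
-- the raw list (with its duplicates) instead of a set of the declared value type.
def Pre_get_unique_words (group_dict : List (String × List Int)) : Prop :=
  (group_dict.map (·.1)).Nodup ∧ (group_dict.length = 1 → ∀ p ∈ group_dict, p.2.Nodup)
instance (group_dict : List (String × List Int)) : Decidable (Pre_get_unique_words group_dict) := by unfold Pre_get_unique_words; infer_instance
def pvWitness_get_unique_words : (List (String × List Int)) :=
  [("a", [1, 2, 3]), ("b", [1, 2, 4, 10]), ("c", [2, 3])]
def Spec_get_unique_words (group_dict : List (String × List Int)) (out : List (String × List Int)) : Prop := out = get_unique_words_alt group_dict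
instance (group_dict : List (String × List Int)) (out : List (String × List Int)) : Decidable (Spec_get_unique_words group_dict out) := by unfold Spec_get_unique_words; infer_instance

-- ===== CLAIM (what is proved, stated in full; the proofs are below) =====
def Claim_equal_get_unique_words : Prop := ∀ (group_dict : List (String × List Int)), Dom_get_unique_words group_dict → Pre_get_unique_words group_dict → Spec_get_unique_words group_dict (get_unique_words group_dict)

-- ===== LEMMAS AND PROOFS =====

-- A's inner loop keeps overwriting the same key: it is one insert of the folded value.
theorem insert_fold_insert {l : List String} (out : PySem.Dict String (List Int)) (k : String)
    (v : List Int) (f : List Int → String → List Int) :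
    l.foldl (fun o x => o.insert k (f (o.getD k []) x)) (out.insert k v)
      = out.insert k (l.foldl f v) := by
  induction l generalizing out v with
  | nil => rfl
  | cons x t ih =>
      simp only [List.foldl_cons, PySem.Dict.getD_insert_self, PySem.Dict.insert_insert_self]
      exact ih out (f v x)

-- folding set differences = one filter by "in none of the other groups" (start list Nodup)
theorem fold_diff_eq_filter (g : String → List Int) (l : List String) (acc : List Int)
    (h : acc.Nodup) :
    l.foldl (fun a o => PySem.Set.diff (PySem.Set.ofList a) (PySem.Set.ofList (g o))) acc
      = acc.filter (fun x => l.all (fun o => !(PySem.Set.ofList (g o)).contains x)) := by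
  induction l generalizing acc with
  | nil => simp
  | cons o t ih =>
      simp only [List.foldl_cons, List.all_cons]
      rw [PySem.Set.diff, PySem.Set.ofList_eq_self_of_nodup acc h,
        ih _ (List.Nodup.filter _ h), List.filter_filter]
      apply List.filter_congr
      intro x _
      simp [Bool.and_comm]

-- B's counter characterized: each element's count is the number of groups containing it
theorem countD_eq (gd : List (String × List Int)) (c : PySem.Dict Int Int) (x : Int) :
    (gd.foldl (fun c p => (PySem.Set.ofList p.2).foldl (fun c x => c.insert x (c.getD x 0 + 1)) c) c).getD x 0
      = c.getD x 0 + (gd.countP (fun q => decide (x ∈ q.2)) : Int) := by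
  induction gd generalizing c with
  | nil => simp
  | cons q t ih =>
      simp only [List.foldl_cons, ih, PySem.Dict.getD_foldl_insert_add_one, List.countP_cons]
      by_cases hx : x ∈ q.2
      · rw [List.count_eq_one_of_mem (PySem.Set.nodup_ofList q.2) ((PySem.Set.mem_ofList q.2 x).mpr hx)]
        simp [hx]; ring
      · rw [List.count_eq_zero_of_not_mem (fun h => hx ((PySem.Set.mem_ofList q.2 x).mp h))]
        simp [hx]

-- with unique keys, p is the only pair carrying its key
theorem filter_key_eq (gd : List (String × List Int)) (p : String × List Int)
    (hp : p ∈ gd) (hnk : (gd.map (·.1)).Nodup) :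
    gd.filter (fun q => q.1 == p.1) = [p] := by
  induction gd with
  | nil => cases hp
  | cons q t ih =>
      simp only [List.map_cons, List.nodup_cons] at hnk
      rcases List.mem_cons.mp hp with rfl | hpt
      · simp only [List.filter_cons, beq_self_eq_true, if_pos]
        have : t.filter (fun q => q.1 == p.1) = [] := by
          apply List.filter_eq_nil_iff.mpr
          intro a ha hk
          have : p.1 ∈ t.map (·.1) := List.mem_map.mpr ⟨a, ha, by simpa using hk⟩
          exact hnk.1 (by simpa using this)
        simp [this]
      · have hne : (q.1 == p.1) = false := by
          apply beq_eq_false_iff_ne.mpr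
          intro h
          exact hnk.1 (h ▸ List.mem_map.mpr ⟨p, hpt, rfl⟩)
        simp [hne, ih hpt hnk.2]

theorem countP_one_iff (gd : List (String × List Int)) (p : String × List Int) (x : Int)
    (hp : p ∈ gd) (hx : x ∈ p.2) (hnk : (gd.map (·.1)).Nodup) :
    (gd.countP (fun q => decide (x ∈ q.2)) = 1 ↔ ∀ q ∈ gd, q.1 ≠ p.1 → x ∉ q.2) := by
  rw [List.countP_eq_countP_filter_add gd _ (fun q => q.1 == p.1), filter_key_eq gd p hp hnk]
  have h1 : List.countP (fun q => decide (x ∈ q.2)) [p] = 1 := by simp [hx]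
  rw [h1]
  constructor
  · intro h q hq hk hxq
    have h0 : List.countP (fun q => decide (x ∈ q.2)) (gd.filter (fun a => !(a.1 == p.1))) = 0 := by omega
    exact (List.countP_eq_zero.mp h0 q (List.mem_filter.mpr ⟨hq, by simpa using hk⟩)) (by simpa using hxq)
  · intro h
    have h0 : List.countP (fun q => decide (x ∈ q.2)) (gd.filter (fun a => !(a.1 == p.1))) = 0 := by
      apply List.countP_eq_zero.mpr
      intro q hq
      rcases List.mem_filter.mp hq with ⟨hq1, hq2⟩
      simpa using h q hq1 (by simpa using hq2)
    omega

-- the value A's i-th iteration stores for group g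
def valA (gd : List (String × List Int)) (g : String) : List Int :=
  ((PySem.List.remove? (PySem.Dict.mk gd).keys g).getD []).foldl
    (fun a o => PySem.Set.diff (PySem.Set.ofList a) (PySem.Set.ofList ((PySem.Dict.mk gd).getD o [])))
    ((PySem.Dict.mk gd).getD g [])

-- A's whole output, one key at a time
theorem portA_eq (gd : List (String × List Int)) (hnk : (gd.map (·.1)).Nodup) :
    get_unique_words gd = (gd.map (·.1)).map (fun g => (g, valA gd g)) := by
  unfold get_unique_words
  simp only []
  have hbody : ∀ (out : PySem.Dict String (List Int)) (g : String), g ∈ (PySem.Dict.mk gd).keys →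
      (((PySem.List.remove? (PySem.Dict.mk gd).keys g).getD []).foldl
        (fun out other => out.insert g
          (PySem.Set.diff (PySem.Set.ofList (out.getD g []))
            (PySem.Set.ofList ((PySem.Dict.mk gd).getD other []))))
        (out.insert g ((PySem.Dict.mk gd).getD g [])))
      = out.insert g (valA gd g) :=
    fun out g _ => insert_fold_insert out g ((PySem.Dict.mk gd).getD g [])
      (fun a o => PySem.Set.diff (PySem.Set.ofList a) (PySem.Set.ofList ((PySem.Dict.mk gd).getD o [])))
  rw [PySem.List.foldl_congr_mem _ _ (fun out g => out.insert g (valA gd g)) _ hbody]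
  rw [PySem.Dict.items_foldl_insert_fresh _ (fun g => g) (valA gd) PySem.Dict.empty
    (fun g _ => PySem.Dict.contains_empty g) (by simpa using hnk)]
  rfl

theorem get_unique_words_spec : Claim_equal_get_unique_words := by
  unfold Claim_equal_get_unique_words
  intro gd _ hpre
  obtain ⟨hnk, h1⟩ := hpre
  unfold Spec_get_unique_words get_unique_words_alt
  rw [portA_eq gd hnk]
  simp only [List.map_map]
  apply List.map_congr_left
  intro p hp
  have hpd : (PySem.Dict.mk gd).getD p.1 [] = p.2 :=
    PySem.Dict.getD_of_mem_items _ (by simpa using hp) (by simpa using hnk) []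
  have hmem : p.1 ∈ (PySem.Dict.mk gd).keys := List.mem_map.mpr ⟨p, hp, rfl⟩
  have hrem : PySem.List.remove? (PySem.Dict.mk gd).keys p.1
      = some (((gd.map (·.1)).erase p.1)) := PySem.List.remove?_eq_some_erase _ _ hmem
  show (p.1, valA gd p.1) = _
  have hcore : valA gd p.1 = (PySem.Set.ofList p.2).filter (fun x =>
      (gd.foldl (fun c p => (PySem.Set.ofList p.2).foldl
        (fun c x => c.insert x (c.getD x 0 + 1)) c)
        (PySem.Dict.empty : PySem.Dict Int Int)).getD x 0 == 1) := by
    unfold valA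
    rw [hrem, Option.getD_some, hpd]
    have hcount : ∀ x : Int, (gd.foldl (fun c p => (PySem.Set.ofList p.2).foldl
        (fun c x => c.insert x (c.getD x 0 + 1)) c)
        (PySem.Dict.empty : PySem.Dict Int Int)).getD x 0
        = (gd.countP (fun q => decide (x ∈ q.2)) : Int) := by
      intro x; simpa using countD_eq gd PySem.Dict.empty x
    rcases herase : (gd.map (·.1)).erase p.1 with _ | ⟨o, rest⟩
    · -- single group: gd = [p]
      have hlen1 : gd.length = 1 := by
        have h := List.length_erase_of_mem (a := p.1) (List.mem_map.mpr ⟨p, hp, rfl⟩ : p.1 ∈ gd.map (·.1))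
        rw [herase] at h
        have : gd.length ≠ 0 := by
          intro h0; rw [List.length_eq_zero_iff.mp h0] at hp; cases hp
        simp at h; omega
      have hnp : p.2.Nodup := h1 hlen1 p hp
      obtain ⟨a, ha⟩ := List.length_eq_one_iff.mp hlen1
      have hpa : p = a := by rw [ha] at hp; simpa using hp
      subst hpa
      rw [herase, List.foldl_nil, PySem.Set.ofList_eq_self_of_nodup _ hnp]
      symm
      apply List.filter_eq_self.mpr
      intro x hx
      simp only [hcount]
      rw [ha]
      simp [hx]
    · rw [herase, List.foldl_cons]
      have hd1 : (PySem.Set.ofList p.2).diff (PySem.Set.ofList ((PySem.Dict.mk gd).getD o []))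
          = (PySem.Set.ofList p.2).filter
              (fun x => !(PySem.Set.ofList ((PySem.Dict.mk gd).getD o [])).contains x) := rfl
      rw [hd1, fold_diff_eq_filter _ rest _ (List.Nodup.filter _ (PySem.Set.nodup_ofList p.2)),
        List.filter_filter]
      apply List.filter_congr
      intro x hxs
      have hx : x ∈ p.2 := (PySem.Set.mem_ofList _ _).mp hxs
      simp only [hcount]
      have herase2 : (gd.map (·.1)).erase p.1 = (gd.filter (fun q => q.1 != p.1)).map (·.1) := by
        rw [List.Nodup.erase_eq_filter hnk, List.filter_map]
        rfl
      have hiff := countP_one_iff gd p x hp hx hnk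
      have hgoal : ((o :: rest).all
          (fun g => !(PySem.Set.ofList ((PySem.Dict.mk gd).getD g [])).contains x))
          = ((gd.countP (fun q => decide (x ∈ q.2)) : Int) == 1) := by
        rw [← herase, herase2, List.all_map, Bool.eq_iff_iff]
        constructor
        · intro hA
          have : ∀ q ∈ gd, q.1 ≠ p.1 → x ∉ q.2 := by
            intro q hq hkq hxq
            have hqmem : q ∈ gd.filter (fun q => q.1 != p.1) :=
              List.mem_filter.mpr ⟨hq, by simpa using hkq⟩
            have := List.all_eq_true.mp hA q hqmem
            have hgq : (PySem.Dict.mk gd).getD q.1 [] = q.2 :=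
              PySem.Dict.getD_of_mem_items _ (by simpa using hq) (by simpa using hnk) []
            simp only [Function.comp, hgq, Bool.not_eq_true'] at this
            exact (by simpa [PySem.Set.contains, PySem.Set.mem_ofList] using this : x ∉ q.2) hxq
          have := hiff.mpr this
          simp [this]
        · intro hC
          have hcp : gd.countP (fun q => decide (x ∈ q.2)) = 1 := by
            have := beq_iff_eq.mp hC; exact_mod_cast this
          have hnone := hiff.mp hcp
          apply List.all_eq_true.mpr
          intro q hqmem
          rcases List.mem_filter.mp hqmem with ⟨hq, hkq⟩
          have hgq : (PySem.Dict.mk gd).getD q.1 [] = q.2 :=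
            PySem.Dict.getD_of_mem_items _ (by simpa using hq) (by simpa using hnk) []
          have hxq : x ∉ q.2 := hnone q hq (by simpa using hkq)
          simp [Function.comp, hgq, PySem.Set.contains, hxq]
      rw [← hgoal]
      simp [List.all_cons, Bool.and_comm]
  rw [hcore]
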